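-- pv_equiv track=rewrite | github.com/Sush97/TalkingColors | color_picker.py | createConceptTable
-- ===== SOURCE A (Python) =====
-- def createConceptTable(output):
--     """ Takes output string and returns a dictionary representing the concept table
--     """
--
--     colors = ["RED", "ORANGE", "YELLOW", "GREEN", "BLUE", \
--         "PURPLE", "BLACK", "WHITE", "GREY", "PINK", "GRAY"]
--     attributes = ["BRIGHTER", "LIGHTER", "LIGHT", "DARKER", \
--         "BRIGHT", "DARK", "SATURATED", "DESATURATED"]
--     degrees = ["A LOT", "MUCH", "A LITTLE", "A TINY BIT"]
--     directions = ["MORE", "LESS"]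
--     output_formats = ["HEX", "RGB", "HEXADECIMAL"]
--     help = ["HELP"]
--     start_over = ["START OVER", "RESTART"]
--     exit = ["QUIT", "STOP", "DONE", "EXIT"]
--     color_adjs = ["REDDER", "REDDISH", "ORANGER", "ORANGISH", "YEllOWER", "YELLOWISH", \
--         "GREENER", "GREENISH", "BLUER", "BLUISH", "PURPLER", "PURPLISH", "BLACKISH", \
--         "BLACKER", "WHITISH", "WHITER", "GREYISH", "GREYER", "PINKISH", "PINKER"]
--     undo = ["UNDO", "CANCEL", "GO BACK"]
--     navigation_positive = ["YES", "GOOD", "OK", "CONTINUE"]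
--     navigation_negative = ["NO", "BAD", "NOPE"]
--
--     lists = [colors + color_adjs, attributes, degrees, directions, \
--         output_formats, help, start_over, exit, undo, navigation_positive, navigation_negative]
--
--     output_table = [None, None, None, None, None, None, None, None, None, None, None]
--
--     for x in degrees:
--         if x in output:
--             output_table[2] = x
--
--     for x in start_over:
--         if x in output:
--             output_table[6] = x
--
--     output = output.split()
--     for x in output:
--         for i in [0, 1, 3, 4, 5, 7, 8, 9, 10]:
--             for y in lists[i]:
--                 if x == y:
--                     output_table[i] = y
--
--     return output_table
-- ===== SOURCE B (Python) =====
-- # B: builds the table per SLOT: each slot is computed independently as the first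
-- # match in a backwards scan (last match wins), instead of A's in-place overwrites.
-- def createConceptTable(output):
--     degrees = ["A LOT", "MUCH", "A LITTLE", "A TINY BIT"]
--     start_over = ["START OVER", "RESTART"]
--     groups = {
--         0: ["RED", "ORANGE", "YELLOW", "GREEN", "BLUE",
--             "PURPLE", "BLACK", "WHITE", "GREY", "PINK", "GRAY",
--             "REDDER", "REDDISH", "ORANGER", "ORANGISH", "YEllOWER", "YELLOWISH",
--             "GREENER", "GREENISH", "BLUER", "BLUISH", "PURPLER", "PURPLISH",
--             "BLACKISH", "BLACKER", "WHITISH", "WHITER", "GREYISH", "GREYER",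
--             "PINKISH", "PINKER"],
--         1: ["BRIGHTER", "LIGHTER", "LIGHT", "DARKER",
--             "BRIGHT", "DARK", "SATURATED", "DESATURATED"],
--         3: ["MORE", "LESS"],
--         4: ["HEX", "RGB", "HEXADECIMAL"],
--         5: ["HELP"],
--         7: ["QUIT", "STOP", "DONE", "EXIT"],
--         8: ["UNDO", "CANCEL", "GO BACK"],
--         9: ["YES", "GOOD", "OK", "CONTINUE"],
--         10: ["NO", "BAD", "NOPE"],
--     }
--     words = output.split()
--
--     def slot(i):
--         if i == 2:
--             return next((p for p in reversed(degrees) if p in output), None)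
--         if i == 6:
--             return next((p for p in reversed(start_over) if p in output), None)
--         g = groups[i]
--         return next((w for w in reversed(words) if w in g), None)
--
--     return [slot(i) for i in range(11)]
-- ===== Notes on version B (the rewrite author's own statement) =====
-- stated objective: alternative
-- what changed: B inverts the traversal: instead of A's staged in-place overwrites of one mutable table (substring passes, then for each word scanning every keyword list and writing slots), B has no mutable table at all and builds the result per SLOT, computing each of the 11 entries independently as the first match of a backwards scan (last-match-wins) over the phrase list or the word list.
import Mathlib
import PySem

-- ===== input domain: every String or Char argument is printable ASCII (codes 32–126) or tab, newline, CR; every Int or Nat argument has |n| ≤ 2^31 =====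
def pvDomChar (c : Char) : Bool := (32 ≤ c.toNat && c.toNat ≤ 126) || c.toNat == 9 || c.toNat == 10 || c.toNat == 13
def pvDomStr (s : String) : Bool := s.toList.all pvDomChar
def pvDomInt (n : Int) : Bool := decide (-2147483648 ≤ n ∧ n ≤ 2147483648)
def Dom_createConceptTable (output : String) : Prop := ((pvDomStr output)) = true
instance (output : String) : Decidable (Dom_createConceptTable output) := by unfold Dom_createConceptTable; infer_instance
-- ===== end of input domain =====

-- B builds the table per slot (each of the 11 entries computed independently, as the first
-- match of a backwards scan) instead of A's staged in-place overwrites of one mutable table.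

-- ===== PORT A =====
def createConceptTable (output : String) : List (Option String) :=
  let colors : List String := ["RED", "ORANGE", "YELLOW", "GREEN", "BLUE",
    "PURPLE", "BLACK", "WHITE", "GREY", "PINK", "GRAY"]
  let attributes : List String := ["BRIGHTER", "LIGHTER", "LIGHT", "DARKER",
    "BRIGHT", "DARK", "SATURATED", "DESATURATED"]
  let degrees : List String := ["A LOT", "MUCH", "A LITTLE", "A TINY BIT"]
  let directions : List String := ["MORE", "LESS"]
  let output_formats : List String := ["HEX", "RGB", "HEXADECIMAL"]
  let help : List String := ["HELP"]
  let start_over : List String := ["START OVER", "RESTART"]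
  let exit : List String := ["QUIT", "STOP", "DONE", "EXIT"]
  let color_adjs : List String := ["REDDER", "REDDISH", "ORANGER", "ORANGISH", "YEllOWER", "YELLOWISH",
    "GREENER", "GREENISH", "BLUER", "BLUISH", "PURPLER", "PURPLISH", "BLACKISH",
    "BLACKER", "WHITISH", "WHITER", "GREYISH", "GREYER", "PINKISH", "PINKER"]
  let undo : List String := ["UNDO", "CANCEL", "GO BACK"]
  let navigation_positive : List String := ["YES", "GOOD", "OK", "CONTINUE"]
  let navigation_negative : List String := ["NO", "BAD", "NOPE"]
  let lists : List (List String) := [colors ++ color_adjs, attributes, degrees, directions,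
    output_formats, help, start_over, exit, undo, navigation_positive, navigation_negative]
  let output_table : List (Option String) :=
    [none, none, none, none, none, none, none, none, none, none, none]
  let output_table := degrees.foldl (fun t x =>
    if PySem.Str.isIn x output then PySem.List.pySetD t 2 (some x) else t) output_table
  let output_table := start_over.foldl (fun t x =>
    if PySem.Str.isIn x output then PySem.List.pySetD t 6 (some x) else t) output_table
  let words := PySem.Str.split₀ output
  words.foldl (fun t x =>
    ([0, 1, 3, 4, 5, 7, 8, 9, 10] : List Int).foldl (fun t i =>
      (PySem.List.pyGetD lists i []).foldl (fun t y =>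
        if x == y then PySem.List.pySetD t i (some y) else t) t) t) output_table

-- ===== PORT B =====
def createConceptTable_alt (output : String) : List (Option String) :=
  let degrees : List String := ["A LOT", "MUCH", "A LITTLE", "A TINY BIT"]
  let start_over : List String := ["START OVER", "RESTART"]
  let groups : PySem.Dict Int (List String) := PySem.Dict.ofList
    [(0, ["RED", "ORANGE", "YELLOW", "GREEN", "BLUE",
          "PURPLE", "BLACK", "WHITE", "GREY", "PINK", "GRAY",
          "REDDER", "REDDISH", "ORANGER", "ORANGISH", "YEllOWER", "YELLOWISH",
          "GREENER", "GREENISH", "BLUER", "BLUISH", "PURPLER", "PURPLISH",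
          "BLACKISH", "BLACKER", "WHITISH", "WHITER", "GREYISH", "GREYER",
          "PINKISH", "PINKER"]),
     (1, ["BRIGHTER", "LIGHTER", "LIGHT", "DARKER",
          "BRIGHT", "DARK", "SATURATED", "DESATURATED"]),
     (3, ["MORE", "LESS"]),
     (4, ["HEX", "RGB", "HEXADECIMAL"]),
     (5, ["HELP"]),
     (7, ["QUIT", "STOP", "DONE", "EXIT"]),
     (8, ["UNDO", "CANCEL", "GO BACK"]),
     (9, ["YES", "GOOD", "OK", "CONTINUE"]),
     (10, ["NO", "BAD", "NOPE"])]
  let words := PySem.Str.split₀ output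
  let slot : Int → Option String := fun i =>
    if i == 2 then (degrees.reverse).find? (fun p => PySem.Str.isIn p output)
    else if i == 6 then (start_over.reverse).find? (fun p => PySem.Str.isIn p output)
    else
      -- groups[i]: every i in range(11) other than 2 and 6 is a key, so KeyError is unreachable
      let g := (groups.get? i).getD []
      (words.reverse).find? (fun w => g.contains w)
  (PySem.List.pyRange 0 11 1).map slot

-- ===== PRECONDITION & SPEC =====
def Spec_createConceptTable (output : String) (out : List (Option String)) : Prop := out = createConceptTable_alt output
instance (output : String) (out : List (Option String)) : Decidable (Spec_createConceptTable output out) := by unfold Spec_createConceptTable; infer_instance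

-- ===== CLAIM (what is proved, stated in full; the proofs are below) =====
def Claim_equal_createConceptTable : Prop := ∀ (output : String), Dom_createConceptTable output → Spec_createConceptTable output (createConceptTable output)

-- ===== LEMMAS AND PROOFS =====

-- the keyword groups of A's word loop, in A's index order (slot, keyword list)
def pvG0 : List String := ["RED", "ORANGE", "YELLOW", "GREEN", "BLUE",
  "PURPLE", "BLACK", "WHITE", "GREY", "PINK", "GRAY",
  "REDDER", "REDDISH", "ORANGER", "ORANGISH", "YEllOWER", "YELLOWISH",
  "GREENER", "GREENISH", "BLUER", "BLUISH", "PURPLER", "PURPLISH",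
  "BLACKISH", "BLACKER", "WHITISH", "WHITER", "GREYISH", "GREYER",
  "PINKISH", "PINKER"]
def pvG1 : List String := ["BRIGHTER", "LIGHTER", "LIGHT", "DARKER",
  "BRIGHT", "DARK", "SATURATED", "DESATURATED"]
def pvG3 : List String := ["MORE", "LESS"]
def pvG4 : List String := ["HEX", "RGB", "HEXADECIMAL"]
def pvG5 : List String := ["HELP"]
def pvG7 : List String := ["QUIT", "STOP", "DONE", "EXIT"]
def pvG8 : List String := ["UNDO", "CANCEL", "GO BACK"]
def pvG9 : List String := ["YES", "GOOD", "OK", "CONTINUE"]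
def pvG10 : List String := ["NO", "BAD", "NOPE"]

def pvKeywordGroups : List (Int × List String) :=
  [(0, pvG0), (1, pvG1), (3, pvG3), (4, pvG4), (5, pvG5),
   (7, pvG7), (8, pvG8), (9, pvG9), (10, pvG10)]

-- "last segment containing x wins" — what A's overwriting word loop realises
def pvLookupSegs : List (Int × List String) → String → Option Int
  | [], _ => none
  | p :: rest, x =>
    match pvLookupSegs rest x with
    | some i => some i
    | none => if x ∈ p.2 then some p.1 else none

def pvLookup (x : String) : Option Int := pvLookupSegs pvKeywordGroups x

-- a single conditional-overwrite step, abstracted over the classifier L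
def pvStep (L : String → Option Int) (t : List (Option String)) (x : String) : List (Option String) :=
  match L x with
  | some i => PySem.List.pySetD t i (some x)
  | none => t

def pvDegrees : List String := ["A LOT", "MUCH", "A LITTLE", "A TINY BIT"]
def pvStartOver : List String := ["START OVER", "RESTART"]
def pvBase : List (Option String) :=
  [none, none, none, none, none, none, none, none, none, none, none]

def pvL2 (output : String) : String → Option Int :=
  fun p => if PySem.Str.isIn p output then some 2 else none
def pvL6 (output : String) : String → Option Int :=
  fun p => if PySem.Str.isIn p output then some 6 else none

-- A's table after the two substring passes
def pvT0 (output : String) : List (Option String) :=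
  pvStartOver.foldl (pvStep (pvL6 output)) (pvDegrees.foldl (pvStep (pvL2 output)) pvBase)

lemma pv_length_pvStep (L : String → Option Int) (t : List (Option String)) (x : String) :
    (pvStep L t x).length = t.length := by
  unfold pvStep
  cases L x with
  | none => rfl
  | some i => simp [PySem.List.length_pySetD]

lemma pv_foldl_pvStep_length (L : String → Option Int) (ws : List String)
    (t : List (Option String)) : (ws.foldl (pvStep L) t).length = t.length := by
  induction ws generalizing t with
  | nil => rfl
  | cons w ws ih => rw [List.foldl_cons, ih, pv_length_pvStep]

-- the heart: a fold of overwriting steps, read off per slot, is a backwards find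
lemma pv_foldl_pvStep_getElem? (L : String → Option Int)
    (hL : ∀ x i, L x = some i → 0 ≤ i) (ws : List String)
    (t : List (Option String)) (j : Nat) (hj : j < t.length) :
    (ws.foldl (pvStep L) t)[j]? =
      match ws.reverse.find? (fun w => L w == some (j : Int)) with
      | some w => some (some w)
      | none => t[j]? := by
  induction ws generalizing t with
  | nil => simp
  | cons w ws ih =>
    rw [List.foldl_cons]
    have hlen : j < (pvStep L t w).length := by rw [pv_length_pvStep]; exact hj
    rw [ih (pvStep L t w) hlen, List.reverse_cons, List.find?_append]
    cases hfr : ws.reverse.find? (fun w => L w == some (j : Int)) with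
    | some u => simp
    | none =>
      simp only [Option.none_or]
      cases hLw : L w with
      | none =>
        have hp : ((fun w => L w == some (j : Int)) w) = false := by simp [hLw]
        simp [pvStep, hLw]
      | some i =>
        have hi : 0 ≤ i := hL w i hLw
        by_cases hij : i = (j : Int)
        · have hp : ((fun w => L w == some (j : Int)) w) = true := by simp [hLw, hij]
          have : (pvStep L t w)[j]? = some (some w) := by
            have : i.toNat = j := by omega
            simp [pvStep, hLw, PySem.List.pySetD_of_nonneg _ _ hi, this, hj]
          simp [hp, this]
        · have hp : ((fun w => L w == some (j : Int)) w) = false := by simp [hLw, hij]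
          have hne : i.toNat ≠ j := by omega
          have : (pvStep L t w)[j]? = t[j]? := by
            simp [pvStep, hLw, PySem.List.pySetD_of_nonneg _ _ hi,
              List.getElem?_set_ne hne]
          simp [hp, this]

lemma pv_lookupSegs_none (segs : List (Int × List String)) (x : String)
    (h : ∀ p ∈ segs, x ∉ p.2) : pvLookupSegs segs x = none := by
  induction segs with
  | nil => rfl
  | cons p rest ih =>
    have h1 : x ∉ p.2 := h p (by simp)
    have h2 : pvLookupSegs rest x = none := ih (fun q hq => h q (List.mem_cons_of_mem _ hq))
    simp [pvLookupSegs, h1, h2]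

lemma pv_lookup_iff (segs : List (Int × List String))
    (hdisj : segs.Pairwise (fun p q => ∀ x : String, x ∈ p.2 → x ∉ q.2))
    (x : String) (i : Int) :
    pvLookupSegs segs x = some i ↔ ∃ p ∈ segs, p.1 = i ∧ x ∈ p.2 := by
  induction segs with
  | nil => simp [pvLookupSegs]
  | cons p rest ih =>
    rcases List.pairwise_cons.mp hdisj with ⟨hh, ht⟩
    constructor
    · intro he
      simp only [pvLookupSegs] at he
      cases hr : pvLookupSegs rest x with
      | some k =>
        rw [hr] at he
        obtain ⟨q, hq, h1, h2⟩ := (ih ht).mp (hr.trans (by injection he with h; rw [h]))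
        exact ⟨q, List.mem_cons_of_mem _ hq, h1, h2⟩
      | none =>
        rw [hr] at he
        by_cases hx : x ∈ p.2
        · rw [if_pos hx] at he
          exact ⟨p, by simp, by injection he, hx⟩
        · rw [if_neg hx] at he; exact absurd he (by simp)
    · rintro ⟨q, hq, h1, h2⟩
      rcases List.mem_cons.mp hq with rfl | hq'
      · have hn : pvLookupSegs rest x = none :=
          pv_lookupSegs_none rest x (fun r hr => hh r hr x h2)
        simp [pvLookupSegs, hn, h2, h1]
      · have : pvLookupSegs rest x = some i := (ih ht).mpr ⟨q, hq', h1, h2⟩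
        simp [pvLookupSegs, this]

lemma pv_disj : pvKeywordGroups.Pairwise
    (fun p q => ∀ x : String, x ∈ p.2 → x ∉ q.2) := by
  decide

lemma pv_lookup_nonneg (x : String) (i : Int) (h : pvLookup x = some i) : 0 ≤ i := by
  obtain ⟨p, hp, h1, _⟩ := (pv_lookup_iff pvKeywordGroups pv_disj x i).mp h
  have : ∀ q ∈ pvKeywordGroups, 0 ≤ q.1 := by decide
  rw [← h1]; exact this p hp

-- predicate bridge: "A's overwrite classifier says slot j" = "w is in B's group j"
lemma pv_pred (j : Int) (g : List String)
    (hiff : ∀ w, pvLookup w = some j ↔ w ∈ g) :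
    (fun w => pvLookup w == some j) = (fun w : String => g.contains w) := by
  funext w
  by_cases h : w ∈ g
  · simp [h, (hiff w).mpr h]
  · have hne : pvLookup w ≠ some j := fun hh => h ((hiff w).mp hh)
    simp [h, hne]

lemma pv_lookup_g0 (w : String) : pvLookup w = some 0 ↔ w ∈ pvG0 := by
  rw [pvLookup, pv_lookup_iff _ pv_disj]; simp [pvKeywordGroups]
lemma pv_lookup_g1 (w : String) : pvLookup w = some 1 ↔ w ∈ pvG1 := by
  rw [pvLookup, pv_lookup_iff _ pv_disj]; simp [pvKeywordGroups]
lemma pv_lookup_g3 (w : String) : pvLookup w = some 3 ↔ w ∈ pvG3 := by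
  rw [pvLookup, pv_lookup_iff _ pv_disj]; simp [pvKeywordGroups]
lemma pv_lookup_g4 (w : String) : pvLookup w = some 4 ↔ w ∈ pvG4 := by
  rw [pvLookup, pv_lookup_iff _ pv_disj]; simp [pvKeywordGroups]
lemma pv_lookup_g5 (w : String) : pvLookup w = some 5 ↔ w ∈ pvG5 := by
  rw [pvLookup, pv_lookup_iff _ pv_disj]; simp [pvKeywordGroups]
lemma pv_lookup_g7 (w : String) : pvLookup w = some 7 ↔ w ∈ pvG7 := by
  rw [pvLookup, pv_lookup_iff _ pv_disj]; simp [pvKeywordGroups]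
lemma pv_lookup_g8 (w : String) : pvLookup w = some 8 ↔ w ∈ pvG8 := by
  rw [pvLookup, pv_lookup_iff _ pv_disj]; simp [pvKeywordGroups]
lemma pv_lookup_g9 (w : String) : pvLookup w = some 9 ↔ w ∈ pvG9 := by
  rw [pvLookup, pv_lookup_iff _ pv_disj]; simp [pvKeywordGroups]
lemma pv_lookup_g10 (w : String) : pvLookup w = some 10 ↔ w ∈ pvG10 := by
  rw [pvLookup, pv_lookup_iff _ pv_disj]; simp [pvKeywordGroups]
lemma pv_lookup_g2 (w : String) : pvLookup w = some 2 ↔ w ∈ ([] : List String) := by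
  rw [pvLookup, pv_lookup_iff _ pv_disj]; simp [pvKeywordGroups]
lemma pv_lookup_g6 (w : String) : pvLookup w = some 6 ↔ w ∈ ([] : List String) := by
  rw [pvLookup, pv_lookup_iff _ pv_disj]; simp [pvKeywordGroups]

-- phrase-pass classifiers
lemma pv_phrase_step (output : String) (k : Int) :
    pvStep (fun p => if PySem.Str.isIn p output then some k else none)
      = (fun t x => if PySem.Str.isIn x output then PySem.List.pySetD t k (some x) else t) := by
  funext t x
  unfold pvStep
  cases h : PySem.Str.isIn x output <;> simp only [h] <;> rfl

lemma pv_phrase_pred_self (output : String) (k : Int) :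
    (fun p => (if PySem.Str.isIn p output then some k else none) == some k)
      = (fun p : String => PySem.Str.isIn p output) := by
  funext p
  cases h : PySem.Str.isIn p output <;> simp

lemma pv_phrase_pred_ne (output : String) (k j : Int) (hkj : k ≠ j) :
    (fun p => (if PySem.Str.isIn p output then some k else none) == some j)
      = (fun _ : String => false) := by
  funext p
  cases h : PySem.Str.isIn p output <;> simp [hkj]

-- the congruence used to swap A's word-step for the abstract pvStep
lemma pv_words_fold_eq (f g : List (Option String) → String → List (Option String))
    (h : ∀ t x, f t x = g t x) (ws : List String) (t : List (Option String)) :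
    ws.foldl f t = ws.foldl g t := by
  have hfg : f = g := funext fun t => funext (h t)
  rw [hfg]

-- per-keyword inner scan of A = conditional set
lemma pv_fold_scan (x : String) (i : Int) (hi : 0 ≤ i) (l : List String)
    (t : List (Option String)) :
    l.foldl (fun t y => if x == y then PySem.List.pySetD t i (some y) else t) t
      = if x ∈ l then PySem.List.pySetD t i (some x) else t := by
  induction l generalizing t with
  | nil => simp
  | cons y l ih =>
    simp only [List.foldl_cons]
    by_cases hxy : x = y
    · subst hxy
      rw [if_pos (by simp : (x == x) = true), ih]
      by_cases hc : x ∈ l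
      · rw [if_pos hc, if_pos (by simp : x ∈ x :: l)]
        simp only [PySem.List.pySetD_of_nonneg _ _ hi, List.set_set]
      · rw [if_neg hc, if_pos (by simp : x ∈ x :: l)]
    · rw [if_neg (by simp [hxy] : ¬ (x == y) = true), ih]
      by_cases hc : x ∈ l <;> simp [hc, List.mem_cons, hxy]

-- A's chain of per-segment conditional sets
def pvApplyA (segs : List (Int × List String)) (t : List (Option String)) (x : String) :
    List (Option String) :=
  segs.foldl (fun t p => if x ∈ p.2 then PySem.List.pySetD t p.1 (some x) else t) t

lemma pv_applyA_eq (segs : List (Int × List String))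
    (hdisj : segs.Pairwise (fun p q => ∀ x : String, x ∈ p.2 → x ∉ q.2))
    (t : List (Option String)) (x : String) :
    pvApplyA segs t x
      = match pvLookupSegs segs x with
        | some i => PySem.List.pySetD t i (some x)
        | none => t := by
  induction segs generalizing t with
  | nil => rfl
  | cons p rest ih =>
    rcases List.pairwise_cons.mp hdisj with ⟨hhead, htail⟩
    simp only [pvApplyA, List.foldl_cons, pvLookupSegs]
    by_cases hc : x ∈ p.2
    · have hn : pvLookupSegs rest x = none :=
        pv_lookupSegs_none rest x (fun q hq => hhead q hq x hc)
      have h2 := ih htail (PySem.List.pySetD t p.1 (some x))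
      simp only [pvApplyA] at h2
      rw [if_pos hc, h2, hn]
      simp [hc]
    · have h2 := ih htail t
      simp only [pvApplyA] at h2
      rw [if_neg hc, h2]
      cases hrest : pvLookupSegs rest x with
      | some i => simp
      | none => simp [hc]

-- A's per-word nested loops = one abstract overwrite step
lemma pv_stepA (t : List (Option String)) (x : String) :
    ([0, 1, 3, 4, 5, 7, 8, 9, 10] : List Int).foldl (fun t i =>
      (PySem.List.pyGetD ([pvG0, pvG1, pvDegrees, pvG3, pvG4, pvG5, pvStartOver,
        pvG7, pvG8, pvG9, pvG10] : List (List String)) i []).foldl (fun t y =>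
          if x == y then PySem.List.pySetD t i (some y) else t) t) t
      = pvStep pvLookup t x := by
  rw [pvStep, pvLookup, ← pv_applyA_eq pvKeywordGroups pv_disj t x]
  simp only [List.foldl_cons, List.foldl_nil]
  rw [pv_fold_scan x 0 (by decide), pv_fold_scan x 1 (by decide), pv_fold_scan x 3 (by decide),
      pv_fold_scan x 4 (by decide), pv_fold_scan x 5 (by decide), pv_fold_scan x 7 (by decide),
      pv_fold_scan x 8 (by decide), pv_fold_scan x 9 (by decide), pv_fold_scan x 10 (by decide)]
  simp only [pvApplyA, pvKeywordGroups, List.foldl_cons, List.foldl_nil]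
  rfl

lemma pv_phraseL_nonneg (output : String) (k : Int) (hk : 0 ≤ k) :
    ∀ x i, (if PySem.Str.isIn x output then some k else none) = some i → 0 ≤ i := by
  intro x i h
  split at h
  · injection h with h
    omega
  · exact absurd h (by simp)

lemma pv_t0_length (output : String) : (pvT0 output).length = 11 := by
  rw [pvT0, pv_foldl_pvStep_length, pv_foldl_pvStep_length]; rfl

lemma pv_t0_getElem_slot (output : String) (j : Nat) (hj : j < 11) (h2 : j ≠ 2) (h6 : j ≠ 6) :
    (pvT0 output)[j]? = some none := by
  have hL2 : ∀ x i, pvL2 output x = some i → 0 ≤ i :=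
    fun x i h => pv_phraseL_nonneg output 2 (by omega) x i h
  have hL6 : ∀ x i, pvL6 output x = some i → 0 ≤ i :=
    fun x i h => pv_phraseL_nonneg output 6 (by omega) x i h
  have hlen : j < (pvDegrees.foldl (pvStep (pvL2 output)) pvBase).length := by
    rw [pv_foldl_pvStep_length]; simpa [pvBase] using hj
  rw [pvT0, pv_foldl_pvStep_getElem? (pvL6 output) hL6 _ _ j hlen]
  rw [show (fun w => pvL6 output w == some (j : Int)) = (fun _ : String => false) from
    pv_phrase_pred_ne output 6 j (by omega)]
  rw [List.find?_eq_none.mpr (by simp)]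
  rw [pv_foldl_pvStep_getElem? (pvL2 output) hL2 _ _ j (by simp [pvBase]; omega)]
  rw [show (fun w => pvL2 output w == some (j : Int)) = (fun _ : String => false) from
    pv_phrase_pred_ne output 2 j (by omega)]
  rw [List.find?_eq_none.mpr (by simp)]
  interval_cases j <;> rfl

lemma pv_t0_getElem_phrase (output : String) (k : Nat) (ps : List String)
    (hk : (k = 2 ∧ ps = pvDegrees) ∨ (k = 6 ∧ ps = pvStartOver)) :
    (pvT0 output)[k]? = some (ps.reverse.find? (fun p => PySem.Str.isIn p output)) := by
  have hL2 : ∀ x i, pvL2 output x = some i → 0 ≤ i :=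
    fun x i h => pv_phraseL_nonneg output 2 (by omega) x i h
  have hL6 : ∀ x i, pvL6 output x = some i → 0 ≤ i :=
    fun x i h => pv_phraseL_nonneg output 6 (by omega) x i h
  have hlen : ∀ j : Nat, j < 11 → j < (pvDegrees.foldl (pvStep (pvL2 output)) pvBase).length := by
    intro j hj; rw [pv_foldl_pvStep_length]; simpa [pvBase] using hj
  rcases hk with ⟨rfl, rfl⟩ | ⟨rfl, rfl⟩
  · rw [pvT0, pv_foldl_pvStep_getElem? (pvL6 output) hL6 _ _ 2 (hlen 2 (by omega))]
    rw [show (fun w => pvL6 output w == some ((2 : Nat) : Int)) = (fun _ : String => false) from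
      pv_phrase_pred_ne output 6 2 (by omega)]
    rw [List.find?_eq_none.mpr (by simp)]
    rw [pv_foldl_pvStep_getElem? (pvL2 output) hL2 _ _ 2 (by simp [pvBase])]
    rw [show (fun w => pvL2 output w == some ((2 : Nat) : Int))
        = (fun p : String => PySem.Str.isIn p output) from pv_phrase_pred_self output 2]
    cases hf : pvDegrees.reverse.find? (fun p => PySem.Str.isIn p output) <;> simp [pvBase]
  · have hin : (pvDegrees.foldl (pvStep (pvL2 output)) pvBase)[6]? = some none := by
      rw [pv_foldl_pvStep_getElem? (pvL2 output) hL2 _ _ 6 (by simp [pvBase])]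
      rw [show (fun w => pvL2 output w == some ((6 : Nat) : Int)) = (fun _ : String => false) from
        pv_phrase_pred_ne output 2 6 (by omega)]
      rw [List.find?_eq_none.mpr (by simp)]
      simp [pvBase]
    rw [pvT0, pv_foldl_pvStep_getElem? (pvL6 output) hL6 _ _ 6 (hlen 6 (by omega))]
    rw [show (fun w => pvL6 output w == some ((6 : Nat) : Int))
        = (fun p : String => PySem.Str.isIn p output) from pv_phrase_pred_self output 6]
    cases hf : pvStartOver.reverse.find? (fun p => PySem.Str.isIn p output) <;> simp [hin]

-- A rewritten as an abstract overwrite fold over the words, started from pvT0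
lemma pv_A_eq (output : String) :
    createConceptTable output
      = (PySem.Str.split₀ output).foldl (pvStep pvLookup) (pvT0 output) := by
  unfold createConceptTable
  refine (pv_words_fold_eq _ (pvStep pvLookup) (fun t x => pv_stepA t x) _ _).trans ?_
  refine congrArg (fun t => List.foldl (pvStep pvLookup) t (PySem.Str.split₀ output)) ?_
  rw [pvT0]
  unfold pvL2 pvL6
  rw [pv_phrase_step output 2, pv_phrase_step output 6]
  rfl

-- B reduced to its 11 slot expressions
lemma pv_B_eq (output : String) :
    createConceptTable_alt output =
      [(PySem.Str.split₀ output).reverse.find? (fun w => pvG0.contains w),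
       (PySem.Str.split₀ output).reverse.find? (fun w => pvG1.contains w),
       pvDegrees.reverse.find? (fun p => PySem.Str.isIn p output),
       (PySem.Str.split₀ output).reverse.find? (fun w => pvG3.contains w),
       (PySem.Str.split₀ output).reverse.find? (fun w => pvG4.contains w),
       (PySem.Str.split₀ output).reverse.find? (fun w => pvG5.contains w),
       pvStartOver.reverse.find? (fun p => PySem.Str.isIn p output),
       (PySem.Str.split₀ output).reverse.find? (fun w => pvG7.contains w),
       (PySem.Str.split₀ output).reverse.find? (fun w => pvG8.contains w),
       (PySem.Str.split₀ output).reverse.find? (fun w => pvG9.contains w),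
       (PySem.Str.split₀ output).reverse.find? (fun w => pvG10.contains w)] := by
  rfl

-- ===== VERDICT (by name: the statement is the Claim_ definition above) =====
theorem createConceptTable_spec : Claim_equal_createConceptTable := by
  intro output _
  unfold Spec_createConceptTable
  rw [pv_A_eq output, pv_B_eq output]
  apply List.ext_getElem?
  intro j
  by_cases hj : j < 11
  · have hjt : j < (pvT0 output).length := by rw [pv_t0_length]; exact hj
    rw [pv_foldl_pvStep_getElem? pvLookup pv_lookup_nonneg _ _ j hjt]
    interval_cases j <;> simp only [Nat.cast_ofNat, Nat.cast_zero, Nat.cast_one]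
    · rw [pv_pred 0 pvG0 pv_lookup_g0, pv_t0_getElem_slot output 0 (by omega) (by omega) (by omega)]
      cases hf : (PySem.Str.split₀ output).reverse.find? (fun w => pvG0.contains w) <;> simp
    · rw [pv_pred 1 pvG1 pv_lookup_g1, pv_t0_getElem_slot output 1 (by omega) (by omega) (by omega)]
      cases hf : (PySem.Str.split₀ output).reverse.find? (fun w => pvG1.contains w) <;> simp
    · rw [pv_pred 2 [] pv_lookup_g2]
      rw [List.find?_eq_none.mpr (by simp)]
      rw [pv_t0_getElem_phrase output 2 pvDegrees (Or.inl ⟨rfl, rfl⟩)]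
      simp
    · rw [pv_pred 3 pvG3 pv_lookup_g3, pv_t0_getElem_slot output 3 (by omega) (by omega) (by omega)]
      cases hf : (PySem.Str.split₀ output).reverse.find? (fun w => pvG3.contains w) <;> simp
    · rw [pv_pred 4 pvG4 pv_lookup_g4, pv_t0_getElem_slot output 4 (by omega) (by omega) (by omega)]
      cases hf : (PySem.Str.split₀ output).reverse.find? (fun w => pvG4.contains w) <;> simp
    · rw [pv_pred 5 pvG5 pv_lookup_g5, pv_t0_getElem_slot output 5 (by omega) (by omega) (by omega)]
      cases hf : (PySem.Str.split₀ output).reverse.find? (fun w => pvG5.contains w) <;> simp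
    · rw [pv_pred 6 [] pv_lookup_g6]
      rw [List.find?_eq_none.mpr (by simp)]
      rw [pv_t0_getElem_phrase output 6 pvStartOver (Or.inr ⟨rfl, rfl⟩)]
      simp
    · rw [pv_pred 7 pvG7 pv_lookup_g7, pv_t0_getElem_slot output 7 (by omega) (by omega) (by omega)]
      cases hf : (PySem.Str.split₀ output).reverse.find? (fun w => pvG7.contains w) <;> simp
    · rw [pv_pred 8 pvG8 pv_lookup_g8, pv_t0_getElem_slot output 8 (by omega) (by omega) (by omega)]
      cases hf : (PySem.Str.split₀ output).reverse.find? (fun w => pvG8.contains w) <;> simp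
    · rw [pv_pred 9 pvG9 pv_lookup_g9, pv_t0_getElem_slot output 9 (by omega) (by omega) (by omega)]
      cases hf : (PySem.Str.split₀ output).reverse.find? (fun w => pvG9.contains w) <;> simp
    · rw [pv_pred 10 pvG10 pv_lookup_g10,
        pv_t0_getElem_slot output 10 (by omega) (by omega) (by omega)]
      cases hf : (PySem.Str.split₀ output).reverse.find? (fun w => pvG10.contains w) <;> simp
  · have h1 : ((PySem.Str.split₀ output).foldl (pvStep pvLookup) (pvT0 output)).length = 11 := by
      rw [pv_foldl_pvStep_length, pv_t0_length]
    rw [List.getElem?_eq_none (by omega), List.getElem?_eq_none (by simp; omega)]
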